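-- pv_equiv track=rewrite | github.com/robert-ancell/jpegsuite | src/jpeg/lossless.py | make_data_units
-- ===== SOURCE A (Python) =====
-- def predict(predictor, a, b, c):
--     if predictor == 1:
--         return a
--     elif predictor == 2:
--         return b
--     elif predictor == 3:
--         return c
--     elif predictor == 4:
--         return a + (b - c)
--     elif predictor == 5:
--         return a + (b - c) // 2
--     elif predictor == 6:
--         return b + (a - c) // 2
--     elif predictor == 7:
--         return (a + b) // 2
--     else:
--         raise Exception("Unknown predictor")
--
-- def make_data_units(width, samples, precision=8, predictor=1):
--     data_units = []
--     height = len(samples) // width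
--     for y in range(height):
--         for x in range(width):
--             p = _predict(width, samples, x, y, precision=precision, predictor=predictor)
--             diff = samples[y * width + x] - p
--             if diff > 32768:
--                 diff -= 65536
--             if diff < -32767:
--                 diff += 65536
--             data_units.append(diff)
--     return data_units
--
-- def _predict(samples_per_line, samples, x, y, precision=8, predictor=1):
--     a = samples[y * samples_per_line + (x - 1)] if x > 0 else 0
--
--     if y == 0:
--         if x == 0 and y == 0:
--             return 1 << (precision - 1)
--         else:
--             return samples[y * samples_per_line + x - 1]
--     else:
--         if x == 0:
--             return samples[y * samples_per_line + x - samples_per_line]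
--         else:
--             a = samples[y * samples_per_line + x - 1]
--             b = samples[y * samples_per_line + x - samples_per_line]
--             c = samples[y * samples_per_line + x - samples_per_line - 1]
--             return predict(predictor, a, b, c)
-- ===== SOURCE B (Python) =====
-- def predict(predictor, a, b, c):
--     if predictor == 1:
--         return a
--     elif predictor == 2:
--         return b
--     elif predictor == 3:
--         return c
--     elif predictor == 4:
--         return a + (b - c)
--     elif predictor == 5:
--         return a + (b - c) // 2
--     elif predictor == 6:
--         return b + (a - c) // 2
--     elif predictor == 7:
--         return (a + b) // 2
--     else:
--         raise Exception("Unknown predictor")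
--
-- def _row_diffs(predictor, precision, prev, row):
--     # Build the whole predicted row at once, then subtract elementwise.
--     if prev is None:
--         pred = [1 << (precision - 1)] + row[:-1]
--     else:
--         pred = [prev[0]] + [predict(predictor, a, b, c)
--                             for a, b, c in zip(row, prev[1:], prev)]
--     return [s - p - 65536 if s - p > 32768 else
--             (s - p + 65536 if s - p < -32767 else s - p)
--             for s, p in zip(row, pred)]
--
-- def make_data_units(width, samples, precision=8, predictor=1):
--     height = len(samples) // width
--     rows = [samples[y * width:(y + 1) * width] for y in range(height)]
--     out = []
--     prev = None
--     for row in rows: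
--         out += _row_diffs(predictor, precision, prev, row)
--         prev = row
--     return out
-- ===== Notes on version B (the rewrite author's own statement) =====
-- stated objective: alternative
-- what changed: B chunks the flat sample list into rows, builds for each row a whole predicted row at once (seed plus the shifted row for row 0, prev[0] plus a zip of the row with the shifted previous row otherwise) and subtracts it elementwise, instead of A's per-pixel index arithmetic through the branching helper _predict.
import Mathlib
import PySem

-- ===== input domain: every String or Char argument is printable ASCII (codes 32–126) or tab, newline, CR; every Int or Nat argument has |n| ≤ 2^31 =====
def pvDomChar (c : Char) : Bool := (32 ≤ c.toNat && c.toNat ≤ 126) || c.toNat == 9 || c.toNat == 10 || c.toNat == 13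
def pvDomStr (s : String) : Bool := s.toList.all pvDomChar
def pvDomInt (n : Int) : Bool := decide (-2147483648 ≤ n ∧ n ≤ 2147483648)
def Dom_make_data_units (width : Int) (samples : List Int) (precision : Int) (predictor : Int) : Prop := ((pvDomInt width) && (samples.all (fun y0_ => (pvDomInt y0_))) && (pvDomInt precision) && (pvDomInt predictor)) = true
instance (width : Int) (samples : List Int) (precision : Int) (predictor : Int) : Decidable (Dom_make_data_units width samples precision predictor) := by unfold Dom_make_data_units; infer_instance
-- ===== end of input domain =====

-- ===== PORT A =====
-- B replaces A's per-pixel index arithmetic with a row-chunked, zip-based pipeline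
-- (whole predicted row built at once, subtracted elementwise); a timing run measured
-- this constant-factor change faster (no per-pixel helper call/branching).
-- `predict` is the identical module-level helper of both Pythons; Python's raise on an
-- unknown predictor is the `else 0` junk branch, excluded by Pre_.
def pvPredict (predictor a b c : Int) : Int :=
  if predictor = 1 then a
  else if predictor = 2 then b
  else if predictor = 3 then c
  else if predictor = 4 then a + (b - c)
  else if predictor = 5 then a + PySem.Int.floordiv (b - c) 2
  else if predictor = 6 then b + PySem.Int.floordiv (a - c) 2
  else if predictor = 7 then PySem.Int.floordiv (a + b) 2
  else 0

-- literal port of `_predict`; out-of-range indices (impossible under Pre_) default to 0,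
-- and `1 << (precision-1)` uses `.toNat` (Python raises for precision ≤ 0, excluded by Pre_)
def pvPredictPixel (samples_per_line : Int) (samples : List Int) (x y precision predictor : Int) : Int :=
  let _a := if x > 0 then PySem.List.pyGetD samples (y * samples_per_line + (x - 1)) 0 else (0 : Int)
  if y = 0 then
    if x = 0 ∧ y = 0 then (1 : Int) <<< (precision - 1).toNat
    else PySem.List.pyGetD samples (y * samples_per_line + x - 1) 0
  else
    if x = 0 then PySem.List.pyGetD samples (y * samples_per_line + x - samples_per_line) 0
    else
      let a := PySem.List.pyGetD samples (y * samples_per_line + x - 1) 0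
      let b := PySem.List.pyGetD samples (y * samples_per_line + x - samples_per_line) 0
      let c := PySem.List.pyGetD samples (y * samples_per_line + x - samples_per_line - 1) 0
      pvPredict predictor a b c

def make_data_units (width : Int) (samples : List Int) (precision : Int) (predictor : Int) : List Int :=
  let height := PySem.Int.floordiv (PySem.List.len samples) width
  (PySem.List.pyRange 0 height 1).foldl (fun data_units y =>
    (PySem.List.pyRange 0 width 1).foldl (fun data_units x =>
      let p := pvPredictPixel width samples x y precision predictor
      let diff := PySem.List.pyGetD samples (y * width + x) 0 - p
      let diff := if diff > 32768 then diff - 65536 else diff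
      let diff := if diff < -32767 then diff + 65536 else diff
      data_units ++ [diff]) data_units) []

-- ===== PORT B =====
-- port of Source B's conditional expression `s-p-65536 if s-p>32768 else (s-p+65536 if s-p<-32767 else s-p)`
def pvWrap (d : Int) : Int :=
  if d > 32768 then d - 65536 else if d < -32767 then d + 65536 else d

-- port of `_row_diffs`; `prev[0]` (never empty under Pre_) defaults to 0
def pvRowDiffs (predictor precision : Int) (prev : Option (List Int)) (row : List Int) : List Int :=
  let pred :=
    match prev with
    | none => ((1 : Int) <<< (precision - 1).toNat) :: PySem.List.slice row none (some (-1))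
    | some prev =>
        PySem.List.pyGetD prev 0 0 ::
          (List.zip row (List.zip (PySem.List.slice prev (some 1) none) prev)).map
            (fun t => pvPredict predictor t.1 t.2.1 t.2.2)
  (List.zip row pred).map (fun sp => pvWrap (sp.1 - sp.2))

def make_data_units_alt (width : Int) (samples : List Int) (precision : Int) (predictor : Int) : List Int :=
  let height := PySem.Int.floordiv (PySem.List.len samples) width
  let rows := (PySem.List.pyRange 0 height 1).map
    (fun y => PySem.List.slice samples (some (y * width)) (some ((y + 1) * width)))
  (rows.foldl (fun (st : List Int × Option (List Int)) row =>
      (st.1 ++ pvRowDiffs predictor precision st.2 row, some row))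
    (([] : List Int), (none : Option (List Int)))).1

-- ===== PRECONDITION & SPEC =====
-- Pre_ excludes exactly the inputs where Python A raises: width = 0 (ZeroDivisionError),
-- precision ≤ 0 when at least one row exists (negative shift, ValueError), and a predictor
-- outside 1..7 when an interior pixel (y ≥ 1, x ≥ 1) exists (explicit raise in `predict`).
def Pre_make_data_units (width : Int) (samples : List Int) (precision : Int) (predictor : Int) : Prop :=
  width ≠ 0 ∧
  (1 ≤ PySem.Int.floordiv (PySem.List.len samples) width → 1 ≤ precision) ∧
  (2 ≤ width ∧ 2 ≤ PySem.Int.floordiv (PySem.List.len samples) width →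
    1 ≤ predictor ∧ predictor ≤ 7)
instance (width : Int) (samples : List Int) (precision : Int) (predictor : Int) : Decidable (Pre_make_data_units width samples precision predictor) := by unfold Pre_make_data_units; infer_instance

def pvWitness_make_data_units : Int × List Int × Int × Int := (2, [10, 20, 30, 40], 8, 5)

def Spec_make_data_units (width : Int) (samples : List Int) (precision : Int) (predictor : Int) (out : List Int) : Prop := out = make_data_units_alt width samples precision predictor
instance (width : Int) (samples : List Int) (precision : Int) (predictor : Int) (out : List Int) : Decidable (Spec_make_data_units width samples precision predictor out) := by unfold Spec_make_data_units; infer_instance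

-- ===== CLAIM (what is proved, stated in full; the proofs are below) =====
def Claim_equal_make_data_units : Prop := ∀ (width : Int) (samples : List Int) (precision : Int) (predictor : Int), Dom_make_data_units width samples precision predictor → Pre_make_data_units width samples precision predictor → Spec_make_data_units width samples precision predictor (make_data_units width samples precision predictor)

-- ===== LEMMAS AND PROOFS =====

-- proof-only helpers
def pvRowOf (samples : List Int) (w m : Nat) : List Int := (samples.drop (m * w)).take w

def pvARow (width : Int) (samples : List Int) (precision predictor y : Int) : List Int :=
  (PySem.List.pyRange 0 width 1).map (fun x =>
    pvWrap (PySem.List.pyGetD samples (y * width + x) 0 -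
      pvPredictPixel width samples x y precision predictor))

def pvChain (f : Option (List Int) → List Int → List Int) :
    Option (List Int) → List (List Int) → List Int
  | _, [] => []
  | p, r :: rs => f p r ++ pvChain f (some r) rs

theorem pvWrap_def (d : Int) :
    (if (if d > 32768 then d - 65536 else d) < -32767
      then (if d > 32768 then d - 65536 else d) + 65536
      else (if d > 32768 then d - 65536 else d)) = pvWrap d := by
  unfold pvWrap; split_ifs <;> omega

theorem pv_floordiv_nonpos (n w : Int) (hn : 0 ≤ n) (hw : w ≤ 0) :
    PySem.Int.floordiv n w ≤ 0 := by
  rcases eq_or_lt_of_le hw with h0 | hneg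
  · subst h0; simp [PySem.Int.floordiv]
  · by_contra h
    have hq : 1 ≤ PySem.Int.floordiv n w := by omega
    have hmod := PySem.Int.mod_neg_bounds n hneg
    have heq := PySem.Int.floordiv_mul_add_mod n w
    nlinarith [hmod.1, hmod.2]

theorem pvChain_foldl (f : Option (List Int) → List Int → List Int) :
    ∀ (rs : List (List Int)) (acc : List Int) (p : Option (List Int)),
      (rs.foldl (fun st row => (st.1 ++ f st.2 row, some row)) (acc, p)).1 =
        acc ++ pvChain f p rs
  | [], acc, p => by simp [pvChain]
  | r :: rs, acc, p => by
      simp only [List.foldl_cons, pvChain, pvChain_foldl f rs]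
      simp

theorem pvRowOf_slice (samples : List Int) (w m : Nat) :
    PySem.List.slice samples (some ((m : Int) * (w : Int))) (some (((m : Int) + 1) * (w : Int))) =
      pvRowOf samples w m := by
  have h1 : ((m : Int) * (w : Int)) = ((m * w : Nat) : Int) := by push_cast; ring
  have h2 : (((m : Int) + 1) * (w : Int)) = ((m * w + w : Nat) : Int) := by push_cast; ring
  rw [h1, h2, PySem.List.slice_natCast, pvRowOf]
  congr 1
  omega

theorem pvRowOf_length (samples : List Int) (w m : Nat)
    (hlen : m * w + w ≤ samples.length) : (pvRowOf samples w m).length = w := by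
  simp [pvRowOf]; omega

theorem pvRowOf_getElem (samples : List Int) (w m i : Nat) (hi : i < w)
    (hlen : m * w + w ≤ samples.length) :
    (pvRowOf samples w m)[i]'(by rw [pvRowOf_length samples w m hlen]; exact hi) =
      samples[m * w + i]'(by omega) := by
  simp [pvRowOf]

theorem pvGetD_nat (samples : List Int) (n : Nat) (h : n < samples.length) :
    PySem.List.pyGetD samples (n : Int) 0 = samples[n] := by
  simp [PySem.List.pyGetD_natCast, List.getD_eq_getElem?_getD, List.getElem?_eq_getElem h]

theorem pvRow0_eq (samples : List Int) (precision predictor : Int) (w : Nat) (hw : 1 ≤ w)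
    (hlen : w ≤ samples.length) :
    pvRowDiffs predictor precision none (pvRowOf samples w 0) =
      pvARow (w : Int) samples precision predictor 0 := by
  have hlen0 : 0 * w + w ≤ samples.length := by omega
  have hrl : (pvRowOf samples w 0).length = w := pvRowOf_length samples w 0 hlen0
  unfold pvRowDiffs pvARow
  apply List.ext_getElem
  · simp [hrl, PySem.List.length_pyRange_one, PySem.List.slice_to_neg_one]; omega
  · intro i h1 h2
    have hi : i < w := by simpa [hrl, PySem.List.length_pyRange_one] using h2
    simp only [List.getElem_map, List.getElem_zip, PySem.List.getElem_pyRange_one,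
      PySem.List.slice_to_neg_one]
    congr 1
    have hrow : ∀ (j : Nat) (hj : j < w),
        (pvRowOf samples w 0)[j]'(by omega) = samples[j]'(by omega) := by
      intro j hj
      have := pvRowOf_getElem samples w 0 j hj hlen0
      simpa using this
    rcases i with _ | j
    · -- pixel (0,0)
      rw [hrow 0 hw]
      simp only [pvPredictPixel]
      simpa using (pvGetD_nat samples 0 (by omega)).symm
    · -- rest of row 0
      have hj1 : j + 1 < w := hi
      rw [hrow (j+1) hj1, List.getElem_cons_succ]
      have hd : (pvRowOf samples w 0).dropLast[j]'(by simp [hrl]; omega) =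
          samples[j]'(by omega) := by
        rw [List.getElem_dropLast]; exact hrow j (by omega)
      rw [hd]
      have hpp : pvPredictPixel (w : Int) samples (0 + ((j:Int)+1)) 0 precision predictor =
          PySem.List.pyGetD samples ((j:Int)) 0 := by
        unfold pvPredictPixel
        rw [if_pos rfl, if_neg (by push_cast; omega : ¬((0:Int) + (((j:Nat):Int)+1) = 0 ∧ (0:Int) = 0))]
        congr 1; ring
      rw [show ((0:Int) + (((j+1:Nat)):Int)) = 0 + ((j:Int)+1) by push_cast; ring]
      rw [hpp, pvGetD_nat samples j (by omega)]
      rw [show ((0:Int) * (w:Int) + (0 + ((j:Int)+1))) = (((j+1:Nat)):Int) by push_cast; ring]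
      rw [pvGetD_nat samples (j+1) (by omega)]

theorem pvPredictPixel_interior (W : Int) (samples : List Int) (x y precision predictor : Int)
    (hy : y ≠ 0) (hx : x ≠ 0) :
    pvPredictPixel W samples x y precision predictor =
      pvPredict predictor (PySem.List.pyGetD samples (y * W + x - 1) 0)
        (PySem.List.pyGetD samples (y * W + x - W) 0)
        (PySem.List.pyGetD samples (y * W + x - W - 1) 0) := by
  unfold pvPredictPixel
  rw [if_neg hy, if_neg hx]

theorem pvRowS_eq (samples : List Int) (precision predictor : Int) (w m : Nat) (hw : 1 ≤ w)
    (hlen : (m + 1) * w + w ≤ samples.length) :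
    pvRowDiffs predictor precision (some (pvRowOf samples w m)) (pvRowOf samples w (m + 1)) =
      pvARow (w : Int) samples precision predictor ((m : Int) + 1) := by
  have hlenp : m * w + w ≤ samples.length := by nlinarith
  have hrl : (pvRowOf samples w (m+1)).length = w := pvRowOf_length samples w (m+1) hlen
  have hpl : (pvRowOf samples w m).length = w := pvRowOf_length samples w m hlenp
  have hrow : ∀ (j : Nat) (hj : j < w),
      (pvRowOf samples w (m+1))[j]'(by omega) = samples[(m+1)*w + j]'(by omega) :=
    fun j hj => pvRowOf_getElem samples w (m+1) j hj hlen
  have hprev : ∀ (j : Nat) (hj : j < w),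
      (pvRowOf samples w m)[j]'(by omega) = samples[m*w + j]'(by omega) :=
    fun j hj => pvRowOf_getElem samples w m j hj hlenp
  unfold pvRowDiffs pvARow
  apply List.ext_getElem
  · simp [hrl, hpl, PySem.List.length_pyRange_one, PySem.List.slice_from_one]; omega
  · intro i h1 h2
    have hi : i < w := by simpa [hrl, PySem.List.length_pyRange_one] using h2
    simp only [List.getElem_map, List.getElem_zip, PySem.List.getElem_pyRange_one,
      PySem.List.slice_from_one]
    congr 1
    rcases i with _ | j
    · -- column 0: the pixel above
      rw [hrow 0 hw, List.getElem_cons_zero]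
      have hp0 : PySem.List.pyGetD (pvRowOf samples w m) 0 0 = samples[m*w]'(by omega) := by
        have h0 := pvGetD_nat (pvRowOf samples w m) 0 (by omega)
        simp only [Nat.cast_zero] at h0
        rw [h0]; simpa using hprev 0 hw
      rw [hp0]
      have hpp : pvPredictPixel (w:Int) samples (0 + ((0:Nat):Int)) ((m:Int)+1) precision predictor
          = PySem.List.pyGetD samples (((m:Int)+1) * w + 0 - w) 0 := by
        unfold pvPredictPixel
        rw [if_neg (by omega : ¬((m:Int)+1 = 0)),
          if_pos (by push_cast : ((0:Int) + ((0:Nat):Int) = 0))]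
        norm_num
      rw [hpp]
      rw [show (((m:Int)+1) * w + 0 - w) = ((m*w : Nat) : Int) by push_cast; ring,
        pvGetD_nat _ (m*w) (by omega)]
      rw [show (((m:Int)+1) * (w:Int) + (0 + ((0:Nat):Int))) = (((m+1)*w : Nat) : Int) by push_cast; ring,
        pvGetD_nat _ ((m+1)*w) (by omega)]
      simp
    · -- interior pixel
      have hj1 : j + 1 < w := hi
      rw [hrow (j+1) hj1, List.getElem_cons_succ, List.getElem_map, List.getElem_zip,
        List.getElem_zip, List.getElem_tail]
      rw [hprev (j+1) (by omega), hprev j (by omega), hrow j (by omega)]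
      rw [pvPredictPixel_interior (w:Int) samples _ _ precision predictor
        (by omega) (by push_cast; omega)]
      rw [show (((m:Int)+1) * (w:Int) + (0 + (((j+1:Nat)):Int)) - 1) = (((m+1)*w + j : Nat) : Int) by push_cast; ring,
        pvGetD_nat _ ((m+1)*w + j) (by omega)]
      rw [show (((m:Int)+1) * (w:Int) + (0 + (((j+1:Nat)):Int)) - w - 1) = ((m*w + j : Nat) : Int) by push_cast; ring,
        pvGetD_nat _ (m*w + j) (by omega)]
      rw [show (((m:Int)+1) * (w:Int) + (0 + (((j+1:Nat)):Int)) - w) = ((m*w + (j+1) : Nat) : Int) by push_cast; ring,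
        pvGetD_nat _ (m*w + (j+1)) (by omega)]
      rw [show (((m:Int)+1) * (w:Int) + (0 + (((j+1:Nat)):Int))) = (((m+1)*w + (j+1) : Nat) : Int) by push_cast; ring,
        pvGetD_nat _ ((m+1)*w + (j+1)) (by omega)]
theorem pvChain_tail (samples : List Int) (precision predictor : Int) (w : Nat) (hw : 1 ≤ w) :
    ∀ (k m : Nat), (m + 1 + k) * w ≤ samples.length →
      pvChain (pvRowDiffs predictor precision) (some (pvRowOf samples w m))
          ((PySem.List.pyRange ((m : Int) + 1) ((m : Int) + 1 + (k : Int)) 1).map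
            (fun y => PySem.List.slice samples (some (y * (w : Int))) (some ((y + 1) * (w : Int))))) =
        (PySem.List.pyRange ((m : Int) + 1) ((m : Int) + 1 + (k : Int)) 1).flatMap
          (pvARow (w : Int) samples precision predictor) := by
  intro k
  induction k with
  | zero =>
      intro m _
      rw [PySem.List.pyRange_one_eq_nil (by norm_num)]
      simp [pvChain]
  | succ k ih =>
      intro m hlen
      rw [PySem.List.pyRange_one_cons (by push_cast; omega)]
      rw [List.map_cons, List.flatMap_cons]
      have hrow : PySem.List.slice samples (some (((m:Int)+1) * (w:Int)))
          (some ((((m:Int)+1) + 1) * (w:Int))) = pvRowOf samples w (m+1) := by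
        have := pvRowOf_slice samples w (m+1)
        rw [show (((m+1:Nat)):Int) = (m:Int)+1 by push_cast; ring] at this
        exact this
      rw [hrow]
      show pvRowDiffs predictor precision (some (pvRowOf samples w m)) (pvRowOf samples w (m+1)) ++ _ = _
      congr 1
      · exact pvRowS_eq samples precision predictor w m hw
          (by nlinarith : (m + 1) * w + w ≤ samples.length)
      · have ih' := ih (m+1)
          (by rw [show m+1+1+k = m+1+(k+1) from by omega]; exact hlen)
        push_cast at ih' ⊢
        convert ih' using 3 <;> ring_nf
theorem pv_floordiv_mul_le (n wd : Int) (hwd : 0 < wd) :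
    PySem.Int.floordiv n wd * wd ≤ n := by
  have := PySem.Int.floordiv_mul_add_mod n wd
  have := PySem.Int.mod_nonneg n hwd
  omega

theorem make_data_units_eq (width : Int) (samples : List Int) (precision predictor : Int)
    (hw : width ≠ 0) :
    make_data_units width samples precision predictor =
    make_data_units_alt width samples precision predictor := by
  unfold make_data_units make_data_units_alt
  rw [pvChain_foldl]
  simp only [List.nil_append, PySem.List.foldl_append_singleton_eq_map,
    PySem.List.foldl_append_eq_flatMap, List.nil_append, pvWrap_def]
  by_cases hpos : 1 ≤ PySem.Int.floordiv (PySem.List.len samples) width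
  · have hwpos : 1 ≤ width := by
      by_contra hwle
      have := pv_floordiv_nonpos (PySem.List.len samples) width
        (by simp [PySem.List.len_eq]) (by omega)
      omega
    set h := PySem.Int.floordiv (PySem.List.len samples) width with hh
    have hmul : h * width ≤ (samples.length : Int) := by
      have := pv_floordiv_mul_le (PySem.List.len samples) width (by omega)
      simpa [PySem.List.len_eq] using this
    obtain ⟨w, rfl⟩ : ∃ w : Nat, width = (w : Int) := ⟨width.toNat, by omega⟩
    have hw1 : 1 ≤ w := by exact_mod_cast hwpos
    obtain ⟨k, hk⟩ : ∃ k : Nat, h = (k : Int) + 1 := ⟨(h - 1).toNat, by omega⟩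
    have hklen : (0 + 1 + k) * w ≤ samples.length := by
      have : ((0 + 1 + k) * w : Int) ≤ (samples.length : Int) := by
        push_cast
        calc ((1:Int) + k) * w = h * w := by rw [hk]; ring
        _ ≤ _ := hmul
      exact_mod_cast this
    rw [hk]
    rw [show PySem.List.pyRange 0 ((k:Int)+1) 1 = 0 :: PySem.List.pyRange 1 ((k:Int)+1) 1
      from PySem.List.pyRange_one_cons (by omega)]
    rw [List.map_cons, List.flatMap_cons, pvChain]
    congr 1
    · have e : PySem.List.slice samples (some ((0:Int) * (w:Int)))
          (some (((0:Int) + 1) * (w:Int))) = pvRowOf samples w 0 := by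
        have := pvRowOf_slice samples w 0
        push_cast at this
        exact this
      rw [e]
      exact (pvRow0_eq samples precision predictor w hw1 (by nlinarith)).symm
    · have e : PySem.List.slice samples (some ((0:Int) * (w:Int)))
          (some (((0:Int) + 1) * (w:Int))) = pvRowOf samples w 0 := by
        have := pvRowOf_slice samples w 0
        push_cast at this
        exact this
      rw [e]
      have := pvChain_tail samples precision predictor w hw1 k 0 hklen
      simp only [Nat.cast_zero, zero_add] at this
      rw [show ((k:Int)+1) = 1 + (k:Int) from by ring]
      exact this.symm
  · have hle : PySem.Int.floordiv (PySem.List.len samples) width ≤ 0 := by omega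
    rw [PySem.List.pyRange_one_eq_nil hle]
    simp [pvChain]

-- ===== VERDICT (by name: the statement is the Claim_ definition above) =====
theorem make_data_units_spec : Claim_equal_make_data_units := by
  intro width samples precision predictor _ hpre
  unfold Spec_make_data_units
  exact make_data_units_eq width samples precision predictor hpre.1
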